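-- pv_equiv track=rewrite | github.com/UmidYul/doxx | application/normalization/light_normalizer.py | normalize_image_urls
-- ===== SOURCE A (Python) =====
-- def normalize_image_urls(urls: list[str] | None) -> list[str]:
--     if not urls:
--         return []
--     seen: set[str] = set()
--     out: list[str] = []
--     for url in urls:
--         text = str(url).strip()
--         if not text or text in seen:
--             continue
--         seen.add(text)
--         out.append(text)
--         if len(out) >= 10:
--             break
--     return out
-- ===== SOURCE B (Python) =====
-- def _pick(urls, k):
--     # selection-style nub: find the first URL with a nonempty stripped form,
--     # emit it, delete all its duplicates from the rest, recurse with budget k-1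
--     if k == 0:
--         return []
--     j = 0
--     while j < len(urls) and not str(urls[j]).strip():
--         j += 1
--     if j == len(urls):
--         return []
--     head = str(urls[j]).strip()
--     return [head] + _pick([u for u in urls[j + 1:] if str(u).strip() != head], k - 1)
--
-- def normalize_image_urls(urls: list[str] | None) -> list[str]:
--     if not urls:
--         return []
--     return _pick(urls, 10)
-- ===== Notes on version B (the rewrite author's own statement) =====
-- stated objective: alternative
-- what changed: B replaces A's single pass with a seen-set accumulator and early break by a selection-style recursive nub: take the first nonempty stripped URL, filter all its duplicates out of the remaining list, and recurse with the budget 10 decremented, so there is no seen set, no output accumulator and no membership test.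
import Mathlib
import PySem

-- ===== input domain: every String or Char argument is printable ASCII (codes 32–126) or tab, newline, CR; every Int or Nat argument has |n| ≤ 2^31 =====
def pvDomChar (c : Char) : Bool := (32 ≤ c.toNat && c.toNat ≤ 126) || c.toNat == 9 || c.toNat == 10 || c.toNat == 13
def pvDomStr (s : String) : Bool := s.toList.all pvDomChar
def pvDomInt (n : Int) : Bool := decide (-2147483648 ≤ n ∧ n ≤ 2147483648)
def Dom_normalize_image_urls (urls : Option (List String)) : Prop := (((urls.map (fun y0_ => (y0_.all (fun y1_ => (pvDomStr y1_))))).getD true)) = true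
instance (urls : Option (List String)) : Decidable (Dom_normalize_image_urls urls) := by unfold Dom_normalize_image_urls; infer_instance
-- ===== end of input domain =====

-- B replaces A's seen-set accumulator loop with a selection-style recursive nub:
-- pick the first nonempty stripped URL, filter its duplicates from the rest, recurse
-- with budget 10 decremented (objective: alternative; same cost).

-- ===== PORT A =====
-- A's for-loop with `seen`, `out` and the `break` at len(out) >= 10, as structural recursion.
def pvLoopA : List String → PySem.Set String → List String → List String
  | [], _, out => out
  | u :: rest, seen, out =>
    let text := PySem.Str.strip u
    if text = "" ∨ text ∈ seen then pvLoopA rest seen out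
    else
      let seen' := PySem.Set.add seen text
      let out' := out ++ [text]
      if 10 ≤ out'.length then out' else pvLoopA rest seen' out'

def normalize_image_urls (urls : Option (List String)) : List String :=
  match urls with
  | none => []
  | some us => if us = [] then [] else pvLoopA us PySem.Set.empty []

-- ===== PORT B =====
-- port of B's `while j < len(urls) and not str(urls[j]).strip(): j += 1` followed by
-- `urls[j:]`: drop the leading URLs whose stripped form is empty.
def pvSkipB : List String → List String
  | [] => []
  | u :: t => if PySem.Str.strip u = "" then pvSkipB t else u :: t

-- port of B's `_pick(urls, k)`
def pvPickB (urls : List String) (k : Nat) : List String :=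
  if k = 0 then []
  else
    match pvSkipB urls with
    | [] => []
    | h :: t =>
      let head := PySem.Str.strip h
      head :: pvPickB (t.filter (fun u => PySem.Str.strip u ≠ head)) (k - 1)
termination_by k
decreasing_by omega

def normalize_image_urls_alt (urls : Option (List String)) : List String :=
  match urls with
  | none => []
  | some us => if us = [] then [] else pvPickB us 10

-- ===== PRECONDITION & SPEC =====
def Spec_normalize_image_urls (urls : Option (List String)) (out : List String) : Prop := out = normalize_image_urls_alt urls
instance (urls : Option (List String)) (out : List String) : Decidable (Spec_normalize_image_urls urls out) := by unfold Spec_normalize_image_urls; infer_instance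

-- ===== CLAIM (what is proved, stated in full; the proofs are below) =====
def Claim_equal_normalize_image_urls : Prop := ∀ (urls : Option (List String)), Dom_normalize_image_urls urls → Spec_normalize_image_urls urls (normalize_image_urls urls)

-- ===== LEMMAS AND PROOFS =====

theorem pvPickB_nil (k : Nat) : pvPickB [] k = [] := by
  unfold pvPickB; simp [pvSkipB]

theorem pvPickB_cons_empty {u : String} (t : List String) (k : Nat)
    (h : PySem.Str.strip u = "") : pvPickB (u :: t) k = pvPickB t k := by
  unfold pvPickB; simp [pvSkipB, h]

theorem pvPickB_cons {u : String} (t : List String) (k : Nat)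
    (h : PySem.Str.strip u ≠ "") (hk : k ≠ 0) :
    pvPickB (u :: t) k =
      PySem.Str.strip u ::
        pvPickB (t.filter (fun v => PySem.Str.strip v ≠ PySem.Str.strip u)) (k - 1) := by
  conv_lhs => rw [pvPickB]
  simp [pvSkipB, h, hk]

-- Loop invariant: with seen = out = acc (nodup, length < 10), A's loop output is acc
-- followed by B's pick over the urls not already seen, with the remaining budget.
theorem pv_loopA_pickB (ts : List String) (acc : List String)
    (hnd : acc.Nodup) (hlt : acc.length < 10) :
    pvLoopA ts acc acc =
      acc ++ pvPickB (ts.filter (fun u => PySem.Str.strip u ∉ acc)) (10 - acc.length) := by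
  induction ts generalizing acc with
  | nil => simp [pvLoopA, pvPickB_nil]
  | cons u rest ih =>
    by_cases hmem : PySem.Str.strip u ∈ acc
    · have he : PySem.Str.strip u = "" ∨ PySem.Str.strip u ∈ acc := Or.inr hmem
      simp only [pvLoopA, if_pos he, List.filter_cons]
      rw [if_neg (by simpa using hmem)]
      exact ih acc hnd hlt
    · by_cases he : PySem.Str.strip u = ""
      · simp only [pvLoopA, List.filter_cons]
        rw [if_pos (Or.inl he), if_pos (by simp [hmem]), pvPickB_cons_empty _ _ he]
        exact ih acc hnd hlt
      · simp only [pvLoopA, List.filter_cons]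
        have hc : ¬(PySem.Str.strip u = "" ∨ PySem.Str.strip u ∈ acc) := by simp [he, hmem]
        rw [if_neg hc]
        have hf : (if decide (PySem.Str.strip u ∉ acc) = true
              then u :: rest.filter (fun v => decide (PySem.Str.strip v ∉ acc))
              else rest.filter (fun v => decide (PySem.Str.strip v ∉ acc)))
            = u :: rest.filter (fun v => decide (PySem.Str.strip v ∉ acc)) := by
          simp [hmem]
        rw [hf, pvPickB_cons _ _ he (by omega)]
        have hadd : PySem.Set.add acc (PySem.Str.strip u) = acc ++ [PySem.Str.strip u] := by
          simp [PySem.Set.add, hmem]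
        by_cases hlen : 10 ≤ (acc ++ [PySem.Str.strip u]).length
        · rw [if_pos hlen]
          have h0 : 10 - acc.length - 1 = 0 := by simp at hlen; omega
          rw [h0]
          simp [pvPickB]
        · rw [if_neg hlen, hadd]
          have hnd' : (acc ++ [PySem.Str.strip u]).Nodup :=
            List.Nodup.append hnd (List.nodup_singleton _)
              (fun a ha hb => hmem ((List.mem_singleton.mp hb) ▸ ha))
          have hlt' : (acc ++ [PySem.Str.strip u]).length < 10 := by
            simp at hlen ⊢; omega
          rw [ih (acc ++ [PySem.Str.strip u]) hnd' hlt']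
          have hfil : rest.filter (fun v => decide (PySem.Str.strip v ∉ acc ++ [PySem.Str.strip u]))
              = (rest.filter (fun v => decide (PySem.Str.strip v ∉ acc))).filter
                  (fun v => decide (PySem.Str.strip v ≠ PySem.Str.strip u)) := by
            rw [List.filter_filter]
            apply List.filter_congr
            intro x _
            by_cases h1 : PySem.Str.strip x ∈ acc <;>
              by_cases h2 : PySem.Str.strip x = PySem.Str.strip u <;>
                simp [h1, h2, List.mem_append]
          have hlen2 : (acc ++ [PySem.Str.strip u]).length = acc.length + 1 := by simp
          have hsub : 10 - (acc.length + 1) = 10 - acc.length - 1 := by omega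
          rw [hfil, hlen2, hsub, List.append_assoc]
          simp

-- ===== VERDICT (by name: the statement is the Claim_ definition above) =====
theorem normalize_image_urls_spec : Claim_equal_normalize_image_urls := by
  intro urls _
  unfold Spec_normalize_image_urls normalize_image_urls normalize_image_urls_alt
  match urls with
  | none => rfl
  | some us =>
    by_cases h : us = []
    · simp [h]
    · simp only [h, if_false]
      have := pv_loopA_pickB us [] (by simp) (by simp)
      simpa using this
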